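-- pv_equiv track=rewrite | github.com/reige012/assignment-16 | answers/henicorhina/assignment10_task1.py | word_counter
-- ===== SOURCE A (Python) =====
-- def word_counter(dic, l):
--     """
--     Takes a list of words and a dictionary of those words
--     Returns a count of words as a list, sorted by decreasing abundance
--     """
--     for word in l:  # iterate across all words in a list
--         for key, value in dic.items():  # iterate across dictionary
--             if word == key:
--                 dic[word] += 1  # increase dictionary counter when words match
--     count_of_words = []
--     for key, value in dic.items():
--         # add words and values to list in form of tuples
--         count_of_words.append((value, key))
--     count_of_words.sort(reverse=True)  # sort words in descending abundance
--     return(count_of_words)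
-- ===== SOURCE B (Python) =====
-- def word_counter(dic, l):
--     """
--     Takes a list of words and a dictionary of those words
--     Returns a count of words as a list, sorted by decreasing abundance
--     """
--     counts = {}  # tally the list once
--     for w in l:
--         counts[w] = counts.get(w, 0) + 1
--     for key in dic:  # merge tallies into the existing dictionary
--         dic[key] += counts.get(key, 0)
--     return sorted(((v, k) for k, v in dic.items()), reverse=True)
-- ===== Notes on version B (the rewrite author's own statement) =====
-- stated objective: faster
-- what changed: A rescans the whole dictionary for every word in the list; B tallies the list once into a frequency table and then merges it into the dictionary in a single pass over the keys, sorting the (count, word) pairs at the end as before.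
import Mathlib
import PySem

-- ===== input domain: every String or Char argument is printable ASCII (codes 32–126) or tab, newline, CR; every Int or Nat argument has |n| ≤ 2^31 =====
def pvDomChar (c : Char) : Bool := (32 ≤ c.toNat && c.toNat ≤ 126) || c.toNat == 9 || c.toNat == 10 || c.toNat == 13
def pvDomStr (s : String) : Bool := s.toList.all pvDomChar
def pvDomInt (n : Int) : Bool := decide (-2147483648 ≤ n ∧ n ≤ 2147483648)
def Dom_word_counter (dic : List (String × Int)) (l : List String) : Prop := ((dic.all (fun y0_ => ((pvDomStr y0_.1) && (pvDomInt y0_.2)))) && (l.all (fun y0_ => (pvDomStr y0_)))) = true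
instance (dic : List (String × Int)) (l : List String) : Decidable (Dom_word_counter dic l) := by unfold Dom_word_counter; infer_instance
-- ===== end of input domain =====

-- B replaces A's per-word rescan of the whole dictionary by a one-pass tally of the
-- list merged once into the dictionary (objective: faster). Both A and B mutate the
-- caller's dict identically; the theorem is about the return value.

-- ===== PORT A =====
def word_counter (dic : List (String × Int)) (l : List String) : List (Int × String) :=
  -- the Python dict argument (assoc list) as a PySem.Dict
  let d0 : PySem.Dict String Int := PySem.Dict.ofList dic
  -- for word in l: for key, value in dic.items(): if word == key: dic[word] += 1
  let d := l.foldl (fun d word =>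
    d.items.foldl (fun acc kv =>
      if word == kv.1 then acc.insert word (acc.getD word 0 + 1) else acc) d) d0
  -- count_of_words = []; for key, value in dic.items(): count_of_words.append((value, key))
  let count_of_words := d.items.foldl (fun acc kv => acc ++ [(kv.2, kv.1)]) []
  -- count_of_words.sort(reverse=True)
  PySem.List.sorted count_of_words (fun x => (toLex x : Int ×ₗ String)) true

-- ===== PORT B =====
def word_counter_alt (dic : List (String × Int)) (l : List String) : List (Int × String) :=
  -- counts = {}; for w in l: counts[w] = counts.get(w, 0) + 1
  let counts : PySem.Dict String Int :=
    l.foldl (fun c w => c.insert w (c.getD w 0 + 1)) PySem.Dict.empty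
  let d0 : PySem.Dict String Int := PySem.Dict.ofList dic
  -- for key in dic: dic[key] += counts.get(key, 0)
  let d := d0.keys.foldl (fun d key => d.modify key 0 (· + counts.getD key 0)) d0
  -- sorted(((v, k) for k, v in dic.items()), reverse=True)
  PySem.List.sorted (d.items.map (fun kv => (kv.2, kv.1))) (fun x => (toLex x : Int ×ₗ String)) true

-- ===== PRECONDITION & SPEC =====
def Spec_word_counter (dic : List (String × Int)) (l : List String) (out : List (Int × String)) : Prop := out = word_counter_alt dic l
instance (dic : List (String × Int)) (l : List String) (out : List (Int × String)) : Decidable (Spec_word_counter dic l out) := by unfold Spec_word_counter; infer_instance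

-- ===== CLAIM (what is proved, stated in full; the proofs are below) =====
def Claim_equal_word_counter : Prop := ∀ (dic : List (String × Int)) (l : List String), Dom_word_counter dic l → Spec_word_counter dic l (word_counter dic l)

-- ===== LEMMAS AND PROOFS =====

-- A's inner loop over a snapshot L of the items: keys are preserved
theorem wcA_inner_keys (w : String) (L : List (String × Int)) (acc : PySem.Dict String Int)
    (h : w ∈ L.map Prod.fst → acc.contains w = true) :
    (L.foldl (fun acc kv =>
      if w == kv.1 then acc.insert w (acc.getD w 0 + 1) else acc) acc).keys = acc.keys := by
  induction L generalizing acc with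
  | nil => rfl
  | cons kv t ih =>
    obtain ⟨k1, v1⟩ := kv
    simp only [List.foldl_cons]
    by_cases hw : w = k1
    · subst hw
      have hc : acc.contains w = true := h (by simp)
      simp only [beq_self_eq_true, if_true]
      rw [ih _ (fun _ => PySem.Dict.contains_insert_self _ _ _)]
      exact PySem.Dict.keys_insert_of_contains _ _ hc
    · have hbe : (w == k1) = false := by simpa using hw
      simp only [hbe, Bool.false_eq_true, if_false]
      exact ih _ (fun hm => h (by simp only [List.map_cons, List.mem_cons]; right; exact hm))

-- A's inner loop: the value at k grows by the number of matching snapshot keys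
theorem wcA_inner_getD (w k : String) (L : List (String × Int)) (acc : PySem.Dict String Int) :
    (L.foldl (fun acc kv =>
      if w == kv.1 then acc.insert w (acc.getD w 0 + 1) else acc) acc).getD k 0
    = acc.getD k 0 + (if k = w then ((L.map Prod.fst).count w : Int) else 0) := by
  induction L generalizing acc with
  | nil => simp
  | cons kv t ih =>
    obtain ⟨k1, v1⟩ := kv
    simp only [List.foldl_cons]
    by_cases hw : w = k1
    · subst hw
      simp only [beq_self_eq_true, if_true]
      rw [ih, PySem.Dict.getD_insert]
      by_cases hk : k = w
      · subst hk
        simp only [List.map_cons, List.count_cons, beq_self_eq_true, if_true]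
        push_cast; ring
      · simp [hk]
    · have hbe : (w == k1) = false := by simpa using hw
      simp only [hbe, Bool.false_eq_true, if_false]
      rw [ih]
      by_cases hk : k = w
      · subst hk
        simp only [List.map_cons, List.count_cons]
        have hne : ¬ (k1 == k) = true := by simpa using fun h => hw h.symm
        simp [hne]
      · simp [hk]

-- A's outer loop: keys preserved, each present key incremented by its count in l
theorem wcA_loop (l : List String) (d : PySem.Dict String Int) (hnd : d.keys.Nodup) :
    (l.foldl (fun d word =>
      d.items.foldl (fun acc kv =>
        if word == kv.1 then acc.insert word (acc.getD word 0 + 1) else acc) d) d).keys = d.keys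
    ∧ ∀ k, (l.foldl (fun d word =>
      d.items.foldl (fun acc kv =>
        if word == kv.1 then acc.insert word (acc.getD word 0 + 1) else acc) d) d).getD k 0
      = d.getD k 0 + (if k ∈ d.keys then (l.count k : Int) else 0) := by
  induction l generalizing d with
  | nil => simp
  | cons w t ih =>
    simp only [List.foldl_cons]
    set d1 := d.items.foldl (fun acc kv =>
      if w == kv.1 then acc.insert w (acc.getD w 0 + 1) else acc) d with hd1
    have hkeys1 : d1.keys = d.keys := by
      apply wcA_inner_keys
      intro hm
      exact (PySem.Dict.contains_iff_mem_keys _ _).mpr hm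
    obtain ⟨ihk, ihg⟩ := ih d1 (hkeys1 ▸ hnd)
    refine ⟨by rw [ihk, hkeys1], fun k => ?_⟩
    rw [ihg k, hkeys1, hd1, wcA_inner_getD]
    have hkeq : d.keys = d.items.map Prod.fst := rfl
    by_cases hk : k ∈ d.keys
    · simp only [if_pos hk]
      by_cases hkw : k = w
      · subst hkw
        have h1 : (d.items.map Prod.fst).count k = 1 :=
          List.count_eq_one_of_mem (hkeq ▸ hnd) (hkeq ▸ hk)
        simp [h1]; ring
      · have hwk : ¬ w = k := fun h => hkw h.symm
        simp [hkw, hwk]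
    · have hcz : (d.items.map Prod.fst).count w = 0 ∨ ¬ k = w := by
        by_cases hkw : k = w
        · left; subst hkw; exact List.count_eq_zero_of_not_mem (hkeq ▸ hk)
        · right; exact hkw
      rcases hcz with hcz | hkw
      · simp [hk, hcz]
      · simp [hkw, hk]

-- B's merge loop over a nodup key list contained in d's keys:
-- keys preserved, values grow by the tally
theorem wcB_loop (counts : PySem.Dict String Int) (ks : List String) (hnd : ks.Nodup)
    (d : PySem.Dict String Int) (hsub : ∀ x ∈ ks, x ∈ d.keys) :
    (ks.foldl (fun d key => d.modify key 0 (· + counts.getD key 0)) d).keys = d.keys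
    ∧ ∀ k, (ks.foldl (fun d key => d.modify key 0 (· + counts.getD key 0)) d).getD k 0
      = d.getD k 0 + (if k ∈ ks then counts.getD k 0 else 0) := by
  induction ks generalizing d with
  | nil => simp
  | cons x t ih =>
    simp only [List.foldl_cons]
    have hx : x ∈ d.keys := hsub x (by simp)
    have hcx : d.contains x = true := (PySem.Dict.contains_iff_mem_keys _ _).mpr hx
    have hkeysm : (d.modify x 0 (· + counts.getD x 0)).keys = d.keys := by
      rw [PySem.Dict.keys_modify]
      exact PySem.Dict.keys_insert_of_contains _ _ hcx
    obtain ⟨ihk, ihg⟩ := ih hnd.of_cons (d.modify x 0 (· + counts.getD x 0))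
      (fun y hy => hkeysm ▸ hsub y (by simp [hy]))
    refine ⟨by rw [ihk, hkeysm], fun k => ?_⟩
    rw [ihg k, PySem.Dict.getD_modify]
    have hxt : x ∉ t := (List.nodup_cons.mp hnd).1
    by_cases hk : k = x
    · subst hk; simp [hxt]
    · simp [List.mem_cons, fun h => hk h]

-- ===== VERDICT (by name: the statement is the Claim_ definition above) =====
theorem word_counter_spec : Claim_equal_word_counter := by
  intro dic l _
  unfold Spec_word_counter word_counter word_counter_alt
  simp only
  rw [PySem.List.foldl_append_singleton_eq_map, List.nil_append,
      PySem.Dict.foldl_insert_getD_add_one_eq_counter]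
  set d0 := PySem.Dict.ofList dic with hd0
  have hnd0 : d0.keys.Nodup := PySem.Dict.nodup_keys_ofList dic
  obtain ⟨hAk, hAg⟩ := wcA_loop l d0 hnd0
  obtain ⟨hBk, hBg⟩ := wcB_loop (PySem.Dict.counter l) d0.keys hnd0 d0 (fun _ h => h)
  congr 1
  rw [PySem.Dict.items_eq_map_keys _ (by rw [hAk]; exact hnd0) 0,
      PySem.Dict.items_eq_map_keys _ (by rw [hBk]; exact hnd0) 0, hAk, hBk,
      List.map_map, List.map_map]
  apply List.map_congr_left
  intro k _
  simp only [Function.comp_def]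
  rw [hAg k, hBg k, PySem.Dict.getD_counter]
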